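-- pv_equiv track=rewrite | github.com/ishajoshi251/Leetcode-Practice | Ticket Counter - GFG/ticket-counter.py | distributeTicket
-- ===== SOURCE A (Python) =====
-- def distributeTicket(N : int, K : int) -> int:
--     # Code Here
--     start = 0
--     end = N + 1
--
--     while start < end:
--         for i in range(K):
--             start += 1
--             N -= 1
--             if N == 0:
--                 return start
--
--         for i in range(K):
--             end -= 1
--             N -= 1
--             if N == 0:
--                 return end
--
--     return -1
-- ===== SOURCE B (Python) =====
-- def distributeTicket(N: int, K: int) -> int:
--     # O(1): full 2K-cycles via divmod, then offset in the forward or backward block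
--     if N <= 0:
--         return -1
--     c, r = divmod(N - 1, 2 * K)
--     if r < K:
--         return c * K + r + 1
--     return N - c * K - (r - K)
-- ===== Notes on version B (the rewrite author's own statement) =====
-- stated objective: faster
-- what changed: Replaced the O(N) simulation of handing out tickets one by one in alternating front/back blocks by O(1) modular arithmetic: divmod(N-1, 2K) gives the number of full cycles and the offset within the forward or backward block.
import Mathlib
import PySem

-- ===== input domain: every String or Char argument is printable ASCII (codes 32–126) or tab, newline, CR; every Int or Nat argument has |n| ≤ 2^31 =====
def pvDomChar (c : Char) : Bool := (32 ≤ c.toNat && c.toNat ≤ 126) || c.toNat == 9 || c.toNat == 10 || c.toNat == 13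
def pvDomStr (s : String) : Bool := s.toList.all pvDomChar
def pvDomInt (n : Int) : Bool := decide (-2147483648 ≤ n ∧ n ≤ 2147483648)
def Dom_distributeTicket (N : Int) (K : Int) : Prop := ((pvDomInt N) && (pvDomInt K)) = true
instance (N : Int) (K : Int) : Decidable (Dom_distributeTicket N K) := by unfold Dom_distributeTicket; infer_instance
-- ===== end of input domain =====

-- B replaces A's O(N) ticket-by-ticket simulation by O(1) modular arithmetic (divmod by 2K); objective: faster.

-- ===== PORT A =====
-- 'for i in range(K): start += 1; N -= 1; if N == 0: return start' — early return via Sum.inr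
def pvForFront : Int → Int → Nat → (Int × Int) ⊕ Int
  | start, n, 0 => Sum.inl (start, n)
  | start, n, k+1 =>
    let start' := start + 1
    let n' := n - 1
    if n' = 0 then Sum.inr start' else pvForFront start' n' k

-- 'for i in range(K): end -= 1; N -= 1; if N == 0: return end'
def pvForBack : Int → Int → Nat → (Int × Int) ⊕ Int
  | e, n, 0 => Sum.inl (e, n)
  | e, n, k+1 =>
    let e' := e - 1
    let n' := n - 1
    if n' = 0 then Sum.inr e' else pvForBack e' n' k

-- the 'while start < end' loop; fuel only makes the (possibly diverging) loop total
def pvWhileA : Nat → Int → Int → Int → Int → Int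
  | 0, _, _, _, _ => -1
  | f+1, K, start, e, n =>
    if start < e then
      match pvForFront start n K.toNat with
      | Sum.inr v => v
      | Sum.inl (start', n') =>
        match pvForBack e n' K.toNat with
        | Sum.inr v => v
        | Sum.inl (e', n'') => pvWhileA f K start' e' n''
    else -1

def distributeTicket (N : Int) (K : Int) : Int :=
  pvWhileA (N.toNat + 2) K 0 (N + 1) N

-- ===== PORT B =====
def distributeTicket_alt (N : Int) (K : Int) : Int :=
  if N ≤ 0 then -1
  else
    let c := PySem.Int.floordiv (N - 1) (2 * K)
    let r := PySem.Int.mod (N - 1) (2 * K)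
    if r < K then c * K + r + 1 else N - c * K - (r - K)

-- ===== PRECONDITION & SPEC =====
-- Pre_ excludes exactly the inputs on which A loops forever (K ≤ 0 with N ≥ 0: both range(K) loops are empty / never reach N == 0)
def Pre_distributeTicket (N : Int) (K : Int) : Prop := 1 ≤ K ∨ N < 0
instance (N : Int) (K : Int) : Decidable (Pre_distributeTicket N K) := by unfold Pre_distributeTicket; infer_instance
def pvWitness_distributeTicket : Int × Int := (5, 2)

def Spec_distributeTicket (N : Int) (K : Int) (out : Int) : Prop := out = distributeTicket_alt N K
instance (N : Int) (K : Int) (out : Int) : Decidable (Spec_distributeTicket N K out) := by unfold Spec_distributeTicket; infer_instance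

-- ===== CLAIM (what is proved, stated in full; the proofs are below) =====
def Claim_equal_distributeTicket : Prop := ∀ (N : Int) (K : Int), Dom_distributeTicket N K → Pre_distributeTicket N K → Spec_distributeTicket N K (distributeTicket N K)

-- ===== LEMMAS AND PROOFS =====

theorem pvForFront_nonpos (k : Nat) : ∀ (s n : Int), n ≤ 0 →
    pvForFront s n k = Sum.inl (s + k, n - k) := by
  induction k with
  | zero => intro s n _; simp [pvForFront]
  | succ k ih =>
    intro s n hn
    simp only [pvForFront]
    rw [if_neg (by omega), ih _ _ (by omega)]
    congr 1; push_cast; simp only [Prod.mk.injEq]; constructor <;> ring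

theorem pvForBack_nonpos (k : Nat) : ∀ (e n : Int), n ≤ 0 →
    pvForBack e n k = Sum.inl (e - k, n - k) := by
  induction k with
  | zero => intro e n _; simp [pvForBack]
  | succ k ih =>
    intro e n hn
    simp only [pvForBack]
    rw [if_neg (by omega), ih _ _ (by omega)]
    congr 1; push_cast; simp only [Prod.mk.injEq]; constructor <;> ring

theorem pvForFront_hit (k : Nat) : ∀ (s n : Int), 1 ≤ n → n ≤ (k : Int) →
    pvForFront s n k = Sum.inr (s + n) := by
  induction k with
  | zero => intro s n h1 h2; exfalso; omega
  | succ k ih =>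
    intro s n h1 h2
    simp only [pvForFront]
    by_cases h : n - 1 = 0
    · rw [if_pos h]; congr 1; omega
    · rw [if_neg h, ih _ _ (by omega) (by push_cast at h2 ⊢; omega)]
      congr 1; ring
  
theorem pvForBack_hit (k : Nat) : ∀ (e n : Int), 1 ≤ n → n ≤ (k : Int) →
    pvForBack e n k = Sum.inr (e - n) := by
  induction k with
  | zero => intro e n h1 h2; exfalso; omega
  | succ k ih =>
    intro e n h1 h2
    simp only [pvForBack]
    by_cases h : n - 1 = 0
    · rw [if_pos h]; congr 1; omega
    · rw [if_neg h, ih _ _ (by omega) (by push_cast at h2 ⊢; omega)]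
      congr 1; ring

theorem pvForFront_miss (k : Nat) : ∀ (s n : Int), (k : Int) < n →
    pvForFront s n k = Sum.inl (s + k, n - k) := by
  induction k with
  | zero => intro s n _; simp [pvForFront]
  | succ k ih =>
    intro s n h
    simp only [pvForFront]
    rw [if_neg (by push_cast at h; omega), ih _ _ (by push_cast at h ⊢; omega)]
    congr 1; push_cast; simp only [Prod.mk.injEq]; constructor <;> ring

theorem pvForBack_miss (k : Nat) : ∀ (e n : Int), (k : Int) < n →
    pvForBack e n k = Sum.inl (e - k, n - k) := by
  induction k with
  | zero => intro e n _; simp [pvForBack]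
  | succ k ih =>
    intro e n h
    simp only [pvForBack]
    rw [if_neg (by push_cast at h; omega), ih _ _ (by push_cast at h ⊢; omega)]
    congr 1; push_cast; simp only [Prod.mk.injEq]; constructor <;> ring

-- closed form of the while loop on live state (e = s + n + 1, n ≥ 1), using Euclidean / and %
theorem pvWhileA_closed (f : Nat) : ∀ (n s K : Int), 1 ≤ K → 1 ≤ n → n.toNat ≤ f →
    pvWhileA f K s (s + n + 1) n =
      (if (n - 1) % (2 * K) < K
       then s + (n - 1) / (2 * K) * K + (n - 1) % (2 * K) + 1
       else (s + n + 1) - (n - 1) / (2 * K) * K - ((n - 1) % (2 * K) - K + 1)) := by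
  induction f with
  | zero => intro n s K hK hn hf; exfalso; omega
  | succ f ih =>
    intro n s K hK hn hf
    have hKt : ((K.toNat : Nat) : Int) = K := Int.toNat_of_nonneg (by omega)
    have h2K : 0 < 2 * K := by omega
    simp only [pvWhileA]
    rw [if_pos (by omega)]
    by_cases hc1 : n ≤ K
    · -- hit in the front block
      rw [pvForFront_hit _ _ _ hn (by omega : n ≤ ((K.toNat : Nat) : Int))]
      have hd : (n - 1) / (2 * K) = 0 := Int.ediv_eq_zero_of_lt (by omega) (by omega)
      have hm : (n - 1) % (2 * K) = n - 1 := Int.emod_eq_of_lt (by omega) (by omega)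
      rw [hd, hm, if_pos (by omega)]; ring
    · rw [pvForFront_miss _ _ _ (by omega : ((K.toNat : Nat) : Int) < n)]
      dsimp only
      by_cases hc2 : n ≤ 2 * K
      · -- hit in the back block
        rw [pvForBack_hit _ _ _ (by omega) (by omega : n - K.toNat ≤ ((K.toNat : Nat) : Int))]
        dsimp only
        have hd : (n - 1) / (2 * K) = 0 := Int.ediv_eq_zero_of_lt (by omega) (by omega)
        have hm : (n - 1) % (2 * K) = n - 1 := Int.emod_eq_of_lt (by omega) (by omega)
        rw [hd, hm, if_neg (by omega)]
        rw [hKt]; ring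
      · -- full cycle, recurse
        rw [pvForBack_miss _ _ _ (by omega : ((K.toNat : Nat) : Int) < n - K.toNat)]
        dsimp only
        rw [hKt]
        have he : s + n + 1 - K = (s + K) + (n - K - K) + 1 := by ring
        rw [he, ih (n - K - K) (s + K) K hK (by omega) (by omega)]
        have hd : (n - K - K - 1) / (2 * K) = (n - 1) / (2 * K) - 1 := by
          have := Int.add_mul_ediv_right (n - 1) (-1) (by omega : 2 * K ≠ 0)
          have harg : n - K - K - 1 = n - 1 + -1 * (2 * K) := by ring
          rw [harg, this]; ring
        have hm : (n - K - K - 1) % (2 * K) = (n - 1) % (2 * K) := by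
          have harg : n - K - K - 1 = n - 1 + -1 * (2 * K) := by ring
          rw [harg]; simp [Int.add_mul_emod_self_left]
        rw [hd, hm]
        split_ifs with h
        · ring
        · ring

theorem distributeTicket_main (N K : Int) (hPre : Pre_distributeTicket N K) :
    distributeTicket N K = distributeTicket_alt N K := by
  unfold distributeTicket distributeTicket_alt
  by_cases hN : N < 0
  · -- while condition 0 < N + 1 is false immediately
    rw [if_pos (by omega)]
    show pvWhileA (N.toNat + 2) K 0 (N + 1) N = -1
    have : N.toNat + 2 = (N.toNat + 1) + 1 := rfl
    rw [this]
    simp only [pvWhileA]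
    rw [if_neg (by omega)]
  · have hK : 1 ≤ K := hPre.resolve_right (by omega)
    have hKt : ((K.toNat : Nat) : Int) = K := Int.toNat_of_nonneg (by omega)
    by_cases hN0 : N = 0
    · -- one empty-handed cycle, then start = K ≥ 1 - K = end
      subst hN0
      rw [if_pos (by omega)]
      show pvWhileA (2) K 0 1 0 = -1
      have h2 : (2 : Nat) = 1 + 1 := rfl
      rw [h2]
      simp only [pvWhileA]
      rw [if_pos (by omega)]
      rw [pvForFront_nonpos K.toNat 0 0 (by omega)]
      dsimp only
      rw [pvForBack_nonpos K.toNat 1 (0 - K.toNat) (by omega)]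
      dsimp only
      rw [if_neg (by omega)]
    · have hN1 : 1 ≤ N := by omega
      rw [if_neg (by omega)]
      have hst : N + 1 = 0 + N + 1 := by ring
      rw [hst, pvWhileA_closed (N.toNat + 2) N 0 K hK hN1 (by omega)]
      have hfd : PySem.Int.floordiv (N - 1) (2 * K) = (N - 1) / (2 * K) :=
        PySem.Int.floordiv_eq_ediv_of_pos (by omega)
      have hmd : PySem.Int.mod (N - 1) (2 * K) = (N - 1) % (2 * K) :=
        PySem.Int.mod_eq_emod_of_pos (by omega)
      simp only [hfd, hmd]
      split_ifs with h
      · ring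
      · ring

-- ===== VERDICT (by name: the statement is the Claim_ definition above) =====
theorem distributeTicket_spec : Claim_equal_distributeTicket := by
  intro N K _ hPre
  exact distributeTicket_main N K hPre
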